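-- pv_equiv track=rewrite | github.com/jetcar/loader | analyzer/analyzer.py | count_jokker_matches
-- ===== SOURCE A (Python) =====
-- def count_jokker_matches(suggestion: str, draw_number: str) -> int:
--     """
--     Count how many consecutive digits match from the right.
--
--     Jokker prizes are awarded for matching the last N digits of the draw number
--     in exact positions from right to left.
--     """
--     matches = 0
--     for s, d in zip(reversed(suggestion), reversed(draw_number)):
--         if s == d:
--             matches += 1
--         else:
--             break
--     return matches
-- ===== SOURCE B (Python) =====
-- def count_jokker_matches(suggestion: str, draw_number: str) -> int:
--     # Binary search for the largest k such that the length-k suffixes are equal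
--     # (suffix equality is monotone in k), comparing whole slices instead of
--     # scanning character by character.
--     lo, hi = 0, min(len(suggestion), len(draw_number))
--     while lo < hi:
--         mid = (lo + hi + 1) // 2
--         if suggestion[len(suggestion) - mid:] == draw_number[len(draw_number) - mid:]:
--             lo = mid
--         else:
--             hi = mid - 1
--     return lo
-- ===== Notes on version B (the rewrite author's own statement) =====
-- stated objective: alternative
-- what changed: B replaces the right-to-left per-character scan with a binary search for the largest k such that the length-k suffixes are equal as whole slices (suffix equality is monotone in k), so no character-by-character loop with break remains.
import Mathlib
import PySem

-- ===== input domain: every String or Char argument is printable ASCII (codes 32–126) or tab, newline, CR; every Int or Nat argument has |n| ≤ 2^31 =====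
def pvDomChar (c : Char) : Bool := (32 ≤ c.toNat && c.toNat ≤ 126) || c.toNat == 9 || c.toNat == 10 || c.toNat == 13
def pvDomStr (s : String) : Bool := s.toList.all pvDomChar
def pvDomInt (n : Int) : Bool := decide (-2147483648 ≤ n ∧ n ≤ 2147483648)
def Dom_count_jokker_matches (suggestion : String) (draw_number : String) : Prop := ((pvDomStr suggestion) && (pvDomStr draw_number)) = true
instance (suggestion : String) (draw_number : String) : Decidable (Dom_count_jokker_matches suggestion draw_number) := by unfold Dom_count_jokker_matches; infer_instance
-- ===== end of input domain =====

-- B binary-searches the largest k whose length-k suffixes are equal as whole slices instead of A's per-character scan with break; alternative algorithm, similar cost.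


-- ===== PORT A =====
-- loop over zip(reversed(suggestion), reversed(draw_number)) with break, accumulating matches
def pvLoopA : List (Char × Char) → Int
  | [] => 0
  | (s, d) :: rest => if s = d then 1 + pvLoopA rest else 0

def count_jokker_matches (suggestion : String) (draw_number : String) : Int :=
  pvLoopA (List.zip suggestion.toList.reverse draw_number.toList.reverse)

-- ===== PORT B =====
-- while lo < hi: mid = (lo+hi+1)//2; compare whole suffix slices s[len(s)-mid:] == d[len(d)-mid:]
def pvBSB (u v : List Char) (lo hi : Int) : Int :=
  if h : lo < hi then
    let mid := PySem.Int.floordiv (lo + hi + 1) 2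
    if PySem.List.slice u (some (PySem.List.len u - mid)) none
        = PySem.List.slice v (some (PySem.List.len v - mid)) none then
      pvBSB u v mid hi
    else
      pvBSB u v lo (mid - 1)
  else lo
termination_by (hi - lo).toNat
decreasing_by
  · have := PySem.Int.floordiv_eq_ediv_of_pos (a := lo + hi + 1) (b := 2) (by omega)
    simp only [this]; omega
  · have := PySem.Int.floordiv_eq_ediv_of_pos (a := lo + hi + 1) (b := 2) (by omega)
    simp only [this]; omega

def count_jokker_matches_alt (suggestion : String) (draw_number : String) : Int :=
  pvBSB suggestion.toList draw_number.toList 0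
    (min (PySem.Str.len suggestion) (PySem.Str.len draw_number))

-- ===== PRECONDITION & SPEC =====
def Spec_count_jokker_matches (suggestion : String) (draw_number : String) (out : Int) : Prop := out = count_jokker_matches_alt suggestion draw_number
instance (suggestion : String) (draw_number : String) (out : Int) : Decidable (Spec_count_jokker_matches suggestion draw_number out) := by unfold Spec_count_jokker_matches; infer_instance

-- ===== CLAIM (what is proved, stated in full; the proofs are below) =====
def Claim_equal_count_jokker_matches : Prop := ∀ (suggestion : String) (draw_number : String), Dom_count_jokker_matches suggestion draw_number → Spec_count_jokker_matches suggestion draw_number (count_jokker_matches suggestion draw_number)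

-- ===== LEMMAS AND PROOFS =====
-- the common-prefix length of the reversed lists: proof-side characterisation of both ports
def pvCP : List Char → List Char → Nat
  | a :: as_, b :: bs => if a = b then 1 + pvCP as_ bs else 0
  | _, _ => 0

lemma pvLoopA_eq_pvCP (xs ys : List Char) :
    pvLoopA (List.zip xs ys) = (pvCP xs ys : Int) := by
  induction xs generalizing ys with
  | nil => cases ys <;> simp [pvLoopA, pvCP]
  | cons a as_ ih =>
    cases ys with
    | nil => simp [pvLoopA, pvCP]
    | cons b bs =>
      by_cases h : a = b <;> simp [pvLoopA, pvCP, h, ih]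

lemma pvCP_le (xs ys : List Char) : pvCP xs ys ≤ min xs.length ys.length := by
  induction xs generalizing ys with
  | nil => cases ys <;> simp [pvCP]
  | cons a as_ ih =>
    cases ys with
    | nil => simp [pvCP]
    | cons b bs =>
      by_cases h : a = b <;> simp [pvCP, h]
      have := ih bs; omega

-- take m agrees exactly up to the common-prefix length (for m within both lengths)
lemma pvCP_take_iff (xs ys : List Char) (m : Nat)
    (hm : m ≤ min xs.length ys.length) :
    (xs.take m = ys.take m) ↔ m ≤ pvCP xs ys := by
  induction xs generalizing ys m with
  | nil => cases ys <;> simp_all [pvCP]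
  | cons a as_ ih =>
    cases ys with
    | nil => simp at hm; simp [hm, pvCP]
    | cons b bs =>
      cases m with
      | zero => simp
      | succ k =>
        by_cases h : a = b
        · subst h
          simp at hm
          rw [List.take_succ_cons, List.take_succ_cons, List.cons_eq_cons]
          have : pvCP (a :: as_) (a :: bs) = 1 + pvCP as_ bs := by simp [pvCP]
          rw [this]
          rw [ih bs k (by omega)]
          constructor
          · rintro ⟨-, h2⟩; omega
          · intro hle; exact ⟨rfl, by omega⟩
        · simp [pvCP, h]

-- the length-m suffix of xs is the reversed length-m prefix of xs.reverse
lemma pvSuffix_eq (xs : List Char) (m : Nat) (_hm : m ≤ xs.length) :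
    xs.drop (xs.length - m) = (xs.reverse.take m).reverse := by
  rw [List.take_reverse, List.reverse_reverse]

-- binary-search invariant: if lo ≤ k ≤ hi (k = common-suffix length) then pvBSB returns k
lemma pvBSB_eq (u v : List Char) (lo hi : Int)
    (h0 : 0 ≤ lo) (hlo : lo ≤ (pvCP u.reverse v.reverse : Int))
    (hhi : (pvCP u.reverse v.reverse : Int) ≤ hi)
    (hmin : hi ≤ min (u.length : Int) (v.length : Int)) :
    pvBSB u v lo hi = (pvCP u.reverse v.reverse : Int) := by
  set k : Nat := pvCP u.reverse v.reverse with hk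
  by_cases h : lo < hi
  · have hmid : PySem.Int.floordiv (lo + hi + 1) 2 = (lo + hi + 1) / 2 :=
      PySem.Int.floordiv_eq_ediv_of_pos (by omega)
    have hbnd : lo < PySem.Int.floordiv (lo + hi + 1) 2
        ∧ PySem.Int.floordiv (lo + hi + 1) 2 ≤ hi := by rw [hmid]; omega
    have hm1 : (PySem.Int.floordiv (lo + hi + 1) 2).toNat ≤ u.length := by omega
    have hm2 : (PySem.Int.floordiv (lo + hi + 1) 2).toNat ≤ v.length := by omega
    have hslice : (PySem.List.slice u
          (some (PySem.List.len u - PySem.Int.floordiv (lo + hi + 1) 2)) none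
        = PySem.List.slice v
          (some (PySem.List.len v - PySem.Int.floordiv (lo + hi + 1) 2)) none)
        ↔ PySem.Int.floordiv (lo + hi + 1) 2 ≤ (k : Int) := by
      rw [PySem.List.slice_from u
            (a := PySem.List.len u - PySem.Int.floordiv (lo + hi + 1) 2)
            (by rw [PySem.List.len_eq]; omega),
          PySem.List.slice_from v
            (a := PySem.List.len v - PySem.Int.floordiv (lo + hi + 1) 2)
            (by rw [PySem.List.len_eq]; omega)]
      have e1 : (PySem.List.len u - PySem.Int.floordiv (lo + hi + 1) 2).toNat
          = u.length - (PySem.Int.floordiv (lo + hi + 1) 2).toNat := by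
        rw [PySem.List.len_eq]; omega
      have e2 : (PySem.List.len v - PySem.Int.floordiv (lo + hi + 1) 2).toNat
          = v.length - (PySem.Int.floordiv (lo + hi + 1) 2).toNat := by
        rw [PySem.List.len_eq]; omega
      rw [e1, e2, pvSuffix_eq u _ hm1, pvSuffix_eq v _ hm2, List.reverse_inj,
          pvCP_take_iff u.reverse v.reverse _ (by simp; omega), ← hk]
      omega
    rw [pvBSB, dif_pos h]
    simp only [hslice]
    split_ifs with hc
    · exact pvBSB_eq u v (PySem.Int.floordiv (lo + hi + 1) 2) hi (by omega) (by omega) hhi hmin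
    · exact pvBSB_eq u v lo (PySem.Int.floordiv (lo + hi + 1) 2 - 1) h0 hlo (by omega) (by omega)
  · rw [pvBSB, dif_neg h]; omega
termination_by (hi - lo).toNat
decreasing_by
  · omega
  · omega

-- ===== VERDICT (by name: the statement is the Claim_ definition above) =====
theorem count_jokker_matches_spec : Claim_equal_count_jokker_matches := by
  intro s d _
  unfold Spec_count_jokker_matches count_jokker_matches count_jokker_matches_alt
  rw [pvLoopA_eq_pvCP]
  have hle := pvCP_le s.toList.reverse d.toList.reverse
  have hlen : min (PySem.Str.len s) (PySem.Str.len d)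
      = min ((s.toList.length : Int)) ((d.toList.length : Int)) := by
    simp [PySem.Str.len_eq]
  rw [hlen]
  rw [pvBSB_eq s.toList d.toList 0 _ le_rfl
      (by positivity)
      (by simp at hle ⊢; omega)
      le_rfl]
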